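-- pv_equiv track=rewrite | github.com/sojiomiwade/supreme-train | edit_distance__add_remove.py | diffBetweenTwoStrings
-- ===== SOURCE A (Python) =====
-- def diffBetweenTwoStrings(source, target):
--   def ddtab():
--     tab = [0]
--     ...
--
--   def dd(sidx, tidx):
--     if (sidx,tidx) in dp:
--       return dp[sidx,tidx]
--     if sidx == len(source) or tidx == len(target):
--       dp[sidx,tidx] = max(len(target)-tidx, len(source)-sidx)
--       return dp[sidx,tidx]
--     if source[sidx] == target[tidx]:
--       dp[sidx,tidx] = dd(sidx+1, tidx+1)
--     else:
--       dp[sidx,tidx] = 1 + min(dd(sidx+1,tidx), dd(sidx,tidx+1))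
--     return dp[sidx,tidx]
--
--   '''
--   AC
--     s
--    t
--   AB
--   '''
--   def helper(sidx, tidx):
--     res = []
--     while sidx < len(source) and tidx < len(target):
--       if source[sidx] == target[tidx]:
--         res += [source[sidx]]
--         sidx, tidx = sidx+1, tidx+1
--       else:
--         if dp[sidx+1,tidx] <= dp[sidx,tidx+1]:
--           res += ['-'+source[sidx]]
--           sidx += 1
--         else:
--           res += ['+'+target[tidx]]
--           tidx += 1
--     for i in range(sidx, len(source)):
--       res += ['-'+source[i]]
--     for i in range(tidx, len(target)):
--       res += ['+'+target[i]]
--     return res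
--   dp = {}
--   dd(0,0)
--   return helper(0,0)
-- ===== SOURCE B (Python) =====
-- def diffBetweenTwoStrings(source, target):
--   n, m = len(source), len(target)
--   # bottom-up table instead of A's memoized recursion
--   dp = [[0] * (m + 1) for _ in range(n + 1)]
--   for i in range(n, -1, -1):
--     for j in range(m, -1, -1):
--       if i == n or j == m:
--         dp[i][j] = max(n - i, m - j)
--       elif source[i] == target[j]:
--         dp[i][j] = dp[i + 1][j + 1]
--       else:
--         dp[i][j] = 1 + min(dp[i + 1][j], dp[i][j + 1])
--   res = []
--   i = j = 0
--   while i < n and j < m: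
--     if source[i] == target[j]:
--       res.append(source[i])
--       i += 1
--       j += 1
--     elif dp[i + 1][j] <= dp[i][j + 1]:
--       res.append('-' + source[i])
--       i += 1
--     else:
--       res.append('+' + target[j])
--       j += 1
--   res.extend('-' + c for c in source[i:])
--   res.extend('+' + c for c in target[j:])
--   return res
-- ===== Notes on version B (the rewrite author's own statement) =====
-- stated objective: alternative
-- what changed: A's memoized top-down recursion dd over a (i,j)-keyed dict is replaced by an explicit bottom-up 2D DP table filled row by row from the bottom; the reconstruction loop reads the full table instead of the memo dict.
import Mathlib
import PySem

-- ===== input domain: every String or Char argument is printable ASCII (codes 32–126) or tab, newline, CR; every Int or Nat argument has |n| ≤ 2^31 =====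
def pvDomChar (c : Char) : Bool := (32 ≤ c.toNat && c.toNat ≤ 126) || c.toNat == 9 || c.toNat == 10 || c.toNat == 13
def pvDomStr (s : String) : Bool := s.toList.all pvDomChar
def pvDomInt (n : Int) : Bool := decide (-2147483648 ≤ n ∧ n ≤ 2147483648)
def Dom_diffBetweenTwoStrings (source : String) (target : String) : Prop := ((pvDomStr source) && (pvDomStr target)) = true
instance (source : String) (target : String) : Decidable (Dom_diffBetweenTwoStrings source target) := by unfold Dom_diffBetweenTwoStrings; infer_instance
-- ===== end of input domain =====

-- B replaces A's memoized recursion `dd` by an explicit bottom-up DP table (alternative decomposition, same O(n*m) cost).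

-- termination measure facts cited by the ports' decreasing_by
lemma pvDecA {n m i j : Nat} (h : i < n ∧ j < m) : n - (i+1) + (m - (j+1)) < n - i + (m - j) := by omega
lemma pvDecB {n m i j : Nat} (h : i < n ∧ j < m) : n - (i+1) + (m - j) < n - i + (m - j) := by omega
lemma pvDecC {n m i j : Nat} (h : i < n ∧ j < m) : n - i + (m - (j+1)) < n - i + (m - j) := by omega
lemma pvDecJ {m j : Nat} (h : j < m) : m - (j+1) < m - j := by omega

-- ===== PORT A =====
-- A's inner `dd`: memoized recursion threading the dict `dp` ('(i,j) in dp' then 'dp[i,j]'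
-- is ported as contains/getD). All reachable calls keep the indices in range, so
-- `getD i ' '` equals Python's `source[sidx]`; the final `else (0, d)` is an unreachable
-- totality guard (Python would have raised IndexError before reaching such a state).
def ddA (s t : List Char) (i j : Nat) (d : PySem.Dict (Nat × Nat) Int) :
    Int × PySem.Dict (Nat × Nat) Int :=
  if d.contains (i, j) = true then (d.getD (i, j) 0, d)
  else if i = s.length ∨ j = t.length then
    (((max (t.length - j) (s.length - i) : Nat) : Int),
     d.insert (i, j) ((max (t.length - j) (s.length - i) : Nat) : Int))
  else if h : i < s.length ∧ j < t.length then
    if s.getD i ' ' = t.getD j ' ' then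
      let r := ddA s t (i+1) (j+1) d
      (r.1, r.2.insert (i, j) r.1)
    else
      let r1 := ddA s t (i+1) j d
      let r2 := ddA s t i (j+1) r1.2
      (1 + min r1.1 r2.1, r2.2.insert (i, j) (1 + min r1.1 r2.1))
  else (0, d)
termination_by (s.length - i) + (t.length - j)
decreasing_by all_goals first | exact pvDecA h | exact pvDecB h | exact pvDecC h

-- A's inner `helper`: walks the strings consulting the memo dict, then flushes the two tails.
def helperA (s t : List Char) (d : PySem.Dict (Nat × Nat) Int) (i j : Nat) : List String :=
  if h : i < s.length ∧ j < t.length then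
    if s.getD i ' ' = t.getD j ' ' then
      String.mk [s.getD i ' '] :: helperA s t d (i+1) (j+1)
    else if (d.get? (i+1, j)).getD 0 ≤ (d.get? (i, j+1)).getD 0 then
      String.mk ['-', s.getD i ' '] :: helperA s t d (i+1) j
    else
      String.mk ['+', t.getD j ' '] :: helperA s t d i (j+1)
  else
    (s.drop i).map (fun c => String.mk ['-', c]) ++ (t.drop j).map (fun c => String.mk ['+', c])
termination_by (s.length - i) + (t.length - j)
decreasing_by all_goals first | exact pvDecA h | exact pvDecB h | exact pvDecC h

def diffBetweenTwoStrings (source : String) (target : String) : List String :=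
  helperA source.toList target.toList
    (ddA source.toList target.toList 0 0 PySem.Dict.empty).2 0 0

-- ===== PORT B =====
-- B's row of the table for a fixed i, columns j..m, given `next` = row i+1 (unread when i = n).
def rowFromB (s t : List Char) (i j : Nat) (next : List Int) : List Int :=
  if h : j < t.length then
    let rest := rowFromB s t i (j+1) next
    (if i = s.length then ((max (s.length - i) (t.length - j) : Nat) : Int)
     else if s.getD i ' ' = t.getD j ' ' then next.getD (j+1) 0
     else 1 + min (next.getD j 0) (rest.getD 0 0))
      :: rest
  else [((max (s.length - i) (t.length - j) : Nat) : Int)]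
termination_by t.length - j
decreasing_by all_goals exact pvDecJ h

-- B's table, rows i..n, each row built from the row below it.
def tableB (s t : List Char) (i : Nat) : List (List Int) :=
  if h : i < s.length then
    let rest := tableB s t (i+1)
    rowFromB s t i 0 (rest.getD 0 []) :: rest
  else [rowFromB s t i 0 []]
termination_by s.length - i
decreasing_by all_goals exact pvDecJ h

def dpB (tab : List (List Int)) (i j : Nat) : Int := (tab.getD i []).getD j 0

-- B's reconstruction loop, reading the full table.
def helperB (s t : List Char) (tab : List (List Int)) (i j : Nat) : List String :=
  if h : i < s.length ∧ j < t.length then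
    if s.getD i ' ' = t.getD j ' ' then
      String.mk [s.getD i ' '] :: helperB s t tab (i+1) (j+1)
    else if dpB tab (i+1) j ≤ dpB tab i (j+1) then
      String.mk ['-', s.getD i ' '] :: helperB s t tab (i+1) j
    else
      String.mk ['+', t.getD j ' '] :: helperB s t tab i (j+1)
  else
    (s.drop i).map (fun c => String.mk ['-', c]) ++ (t.drop j).map (fun c => String.mk ['+', c])
termination_by (s.length - i) + (t.length - j)
decreasing_by all_goals first | exact pvDecA h | exact pvDecB h | exact pvDecC h

def diffBetweenTwoStrings_alt (source : String) (target : String) : List String :=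
  helperB source.toList target.toList (tableB source.toList target.toList 0) 0 0

-- ===== PRECONDITION & SPEC =====
def Spec_diffBetweenTwoStrings (source : String) (target : String) (out : List String) : Prop := out = diffBetweenTwoStrings_alt source target
instance (source : String) (target : String) (out : List String) : Decidable (Spec_diffBetweenTwoStrings source target out) := by unfold Spec_diffBetweenTwoStrings; infer_instance

-- ===== CLAIM (what is proved, stated in full; the proofs are below) =====
def Claim_equal_diffBetweenTwoStrings : Prop := ∀ (source : String) (target : String), Dom_diffBetweenTwoStrings source target → Spec_diffBetweenTwoStrings source target (diffBetweenTwoStrings source target)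

-- ===== LEMMAS AND PROOFS =====

-- The add/remove edit-distance recurrence that both programs tabulate.
def Ed (s t : List Char) (i j : Nat) : Int :=
  if h : i < s.length ∧ j < t.length then
    if s.getD i ' ' = t.getD j ' ' then Ed s t (i+1) (j+1)
    else 1 + min (Ed s t (i+1) j) (Ed s t i (j+1))
  else ((max (s.length - i) (t.length - j) : Nat) : Int)
termination_by (s.length - i) + (t.length - j)
decreasing_by all_goals first | exact pvDecA h | exact pvDecB h | exact pvDecC h

lemma Ed_boundary (s t : List Char) (i j : Nat) (h : ¬ (i < s.length ∧ j < t.length)) :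
    Ed s t i j = ((max (s.length - i) (t.length - j) : Nat) : Int) := by
  rw [Ed, dif_neg h]

lemma Ed_match (s t : List Char) (i j : Nat) (h : i < s.length ∧ j < t.length)
    (hc : s.getD i ' ' = t.getD j ' ') : Ed s t i j = Ed s t (i+1) (j+1) := by
  rw [Ed, dif_pos h, if_pos hc]

lemma Ed_mis (s t : List Char) (i j : Nat) (h : i < s.length ∧ j < t.length)
    (hc : ¬ s.getD i ' ' = t.getD j ' ') :
    Ed s t i j = 1 + min (Ed s t (i+1) j) (Ed s t i (j+1)) := by
  rw [Ed, dif_pos h, if_neg hc]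

def CorrectD (s t : List Char) (d : PySem.Dict (Nat × Nat) Int) : Prop :=
  ∀ p v, d.get? p = some v → v = Ed s t p.1 p.2

def SubD (d d' : PySem.Dict (Nat × Nat) Int) : Prop :=
  ∀ p v, d.get? p = some v → d'.get? p = some v

-- every state A's reconstruction loop can reach from (i,j) has its two lookups present in d
def DoneD (s t : List Char) (d : PySem.Dict (Nat × Nat) Int) (i j : Nat) : Prop :=
  if h : i < s.length ∧ j < t.length then
    if s.getD i ' ' = t.getD j ' ' then DoneD s t d (i+1) (j+1)
    else ((d.get? (i+1, j)).isSome = true) ∧ ((d.get? (i, j+1)).isSome = true) ∧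
         DoneD s t d (i+1) j ∧ DoneD s t d i (j+1)
  else True
termination_by (s.length - i) + (t.length - j)
decreasing_by all_goals first | exact pvDecA h | exact pvDecB h | exact pvDecC h

def ClosedD (s t : List Char) (d : PySem.Dict (Nat × Nat) Int) : Prop :=
  ∀ p, (d.get? p).isSome = true → DoneD s t d p.1 p.2

-- ---- small facts about SubD / inserts ----

lemma subD_refl (d : PySem.Dict (Nat × Nat) Int) : SubD d d := fun _ _ h => h

lemma subD_trans {a b c : PySem.Dict (Nat × Nat) Int} (h1 : SubD a b) (h2 : SubD b c) :
    SubD a c := fun p v h => h2 p v (h1 p v h)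

lemma isSome_subD {d d' : PySem.Dict (Nat × Nat) Int} (h : SubD d d') (p : Nat × Nat)
    (hp : (d.get? p).isSome = true) : (d'.get? p).isSome = true := by
  obtain ⟨v, hv⟩ := Option.isSome_iff_exists.mp hp
  rw [h p v hv]; rfl

lemma correct_insert (s t : List Char) (d : PySem.Dict (Nat × Nat) Int) (i j : Nat) (v : Int)
    (hC : CorrectD s t d) (hv : v = Ed s t i j) : CorrectD s t (d.insert (i, j) v) := by
  intro p w hw
  rw [PySem.Dict.get?_insert] at hw
  by_cases hp : p = (i, j)
  · rw [if_pos hp] at hw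
    cases hw; rw [hp]; exact hv
  · rw [if_neg hp] at hw
    exact hC p w hw

lemma sub_insert (s t : List Char) (d : PySem.Dict (Nat × Nat) Int) (i j : Nat) (v : Int)
    (hC : CorrectD s t d) (hv : v = Ed s t i j) : SubD d (d.insert (i, j) v) := by
  intro p w hw
  rw [PySem.Dict.get?_insert]
  by_cases hp : p = (i, j)
  · rw [if_pos hp]
    have := hC p w hw
    rw [hp] at this
    rw [this, ← hv]
  · rw [if_neg hp]; exact hw

lemma DoneD_mono (s t : List Char) (d d' : PySem.Dict (Nat × Nat) Int)
    (hsub : SubD d d') : ∀ i j, DoneD s t d i j → DoneD s t d' i j := by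
  have main : ∀ N i j, (s.length - i) + (t.length - j) ≤ N →
      DoneD s t d i j → DoneD s t d' i j := by
    intro N
    induction N using Nat.strong_induction_on with
    | _ N ih =>
      intro i j hN h
      rw [DoneD] at h ⊢
      by_cases hlt : i < s.length ∧ j < t.length
      · rw [dif_pos hlt] at h ⊢
        by_cases hc : s.getD i ' ' = t.getD j ' '
        · rw [if_pos hc] at h ⊢
          exact ih ((s.length - (i+1)) + (t.length - (j+1))) (by omega) _ _ (le_refl _) h
        · rw [if_neg hc] at h ⊢
          obtain ⟨h1, h2, h3, h4⟩ := h
          exact ⟨isSome_subD hsub _ h1, isSome_subD hsub _ h2,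
            ih ((s.length - (i+1)) + (t.length - j)) (by omega) _ _ (le_refl _) h3,
            ih ((s.length - i) + (t.length - (j+1))) (by omega) _ _ (le_refl _) h4⟩
      · rw [dif_neg hlt]; trivial
  exact fun i j => main ((s.length - i) + (t.length - j)) i j (le_refl _)

lemma closed_insert (s t : List Char) (d : PySem.Dict (Nat × Nat) Int) (i j : Nat) (v : Int)
    (hCl : ClosedD s t d) (hsub : SubD d (d.insert (i, j) v))
    (hd : DoneD s t (d.insert (i, j) v) i j) : ClosedD s t (d.insert (i, j) v) := by
  intro p hp
  rw [PySem.Dict.get?_insert] at hp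
  by_cases hpe : p = (i, j)
  · rw [hpe]; exact hd
  · rw [if_neg hpe] at hp
    exact DoneD_mono s t d _ hsub p.1 p.2 (hCl p hp)

-- ---- branch equations for the ports ----

lemma ddA_eq_memo (s t : List Char) (i j : Nat) (d : PySem.Dict (Nat × Nat) Int)
    (h : d.contains (i, j) = true) : ddA s t i j d = (d.getD (i, j) 0, d) := by
  rw [ddA, if_pos h]

lemma ddA_eq_base (s t : List Char) (i j : Nat) (d : PySem.Dict (Nat × Nat) Int)
    (h1 : ¬ d.contains (i, j) = true) (h2 : i = s.length ∨ j = t.length) :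
    ddA s t i j d = (((max (t.length - j) (s.length - i) : Nat) : Int),
      d.insert (i, j) ((max (t.length - j) (s.length - i) : Nat) : Int)) := by
  rw [ddA, if_neg h1, if_pos h2]

lemma ddA_eq_match (s t : List Char) (i j : Nat) (d : PySem.Dict (Nat × Nat) Int)
    (h1 : ¬ d.contains (i, j) = true) (h2 : ¬ (i = s.length ∨ j = t.length))
    (h3 : i < s.length ∧ j < t.length) (h4 : s.getD i ' ' = t.getD j ' ') :
    ddA s t i j d = ((ddA s t (i+1) (j+1) d).1,
      (ddA s t (i+1) (j+1) d).2.insert (i, j) (ddA s t (i+1) (j+1) d).1) := by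
  rw [ddA, if_neg h1, if_neg h2, dif_pos h3, if_pos h4]

lemma ddA_eq_mis (s t : List Char) (i j : Nat) (d : PySem.Dict (Nat × Nat) Int)
    (h1 : ¬ d.contains (i, j) = true) (h2 : ¬ (i = s.length ∨ j = t.length))
    (h3 : i < s.length ∧ j < t.length) (h4 : ¬ s.getD i ' ' = t.getD j ' ') :
    ddA s t i j d = (1 + min (ddA s t (i+1) j d).1 (ddA s t i (j+1) (ddA s t (i+1) j d).2).1,
      (ddA s t i (j+1) (ddA s t (i+1) j d).2).2.insert (i, j)
        (1 + min (ddA s t (i+1) j d).1 (ddA s t i (j+1) (ddA s t (i+1) j d).2).1)) := by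
  rw [ddA, if_neg h1, if_neg h2, dif_pos h3, if_neg h4]

lemma helperA_eq_stop (s t : List Char) (d : PySem.Dict (Nat × Nat) Int) (i j : Nat)
    (h : ¬ (i < s.length ∧ j < t.length)) :
    helperA s t d i j = (s.drop i).map (fun c => String.mk ['-', c]) ++
      (t.drop j).map (fun c => String.mk ['+', c]) := by
  rw [helperA, dif_neg h]

lemma helperA_eq_match (s t : List Char) (d : PySem.Dict (Nat × Nat) Int) (i j : Nat)
    (h : i < s.length ∧ j < t.length) (hc : s.getD i ' ' = t.getD j ' ') :
    helperA s t d i j = String.mk [s.getD i ' '] :: helperA s t d (i+1) (j+1) := by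
  rw [helperA, dif_pos h, if_pos hc]

lemma helperA_eq_del (s t : List Char) (d : PySem.Dict (Nat × Nat) Int) (i j : Nat)
    (h : i < s.length ∧ j < t.length) (hc : ¬ s.getD i ' ' = t.getD j ' ')
    (hle : (d.get? (i+1, j)).getD 0 ≤ (d.get? (i, j+1)).getD 0) :
    helperA s t d i j = String.mk ['-', s.getD i ' '] :: helperA s t d (i+1) j := by
  rw [helperA, dif_pos h, if_neg hc, if_pos hle]

lemma helperA_eq_ins (s t : List Char) (d : PySem.Dict (Nat × Nat) Int) (i j : Nat)
    (h : i < s.length ∧ j < t.length) (hc : ¬ s.getD i ' ' = t.getD j ' ')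
    (hle : ¬ (d.get? (i+1, j)).getD 0 ≤ (d.get? (i, j+1)).getD 0) :
    helperA s t d i j = String.mk ['+', t.getD j ' '] :: helperA s t d i (j+1) := by
  rw [helperA, dif_pos h, if_neg hc, if_neg hle]

lemma helperB_eq_stop (s t : List Char) (tab : List (List Int)) (i j : Nat)
    (h : ¬ (i < s.length ∧ j < t.length)) :
    helperB s t tab i j = (s.drop i).map (fun c => String.mk ['-', c]) ++
      (t.drop j).map (fun c => String.mk ['+', c]) := by
  rw [helperB, dif_neg h]

lemma helperB_eq_match (s t : List Char) (tab : List (List Int)) (i j : Nat)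
    (h : i < s.length ∧ j < t.length) (hc : s.getD i ' ' = t.getD j ' ') :
    helperB s t tab i j = String.mk [s.getD i ' '] :: helperB s t tab (i+1) (j+1) := by
  rw [helperB, dif_pos h, if_pos hc]

lemma helperB_eq_del (s t : List Char) (tab : List (List Int)) (i j : Nat)
    (h : i < s.length ∧ j < t.length) (hc : ¬ s.getD i ' ' = t.getD j ' ')
    (hle : dpB tab (i+1) j ≤ dpB tab i (j+1)) :
    helperB s t tab i j = String.mk ['-', s.getD i ' '] :: helperB s t tab (i+1) j := by
  rw [helperB, dif_pos h, if_neg hc, if_pos hle]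

lemma helperB_eq_ins (s t : List Char) (tab : List (List Int)) (i j : Nat)
    (h : i < s.length ∧ j < t.length) (hc : ¬ s.getD i ' ' = t.getD j ' ')
    (hle : ¬ dpB tab (i+1) j ≤ dpB tab i (j+1)) :
    helperB s t tab i j = String.mk ['+', t.getD j ' '] :: helperB s t tab i (j+1) := by
  rw [helperB, dif_pos h, if_neg hc, if_neg hle]

lemma rowFromB_eq_in (s t : List Char) (i j : Nat) (next : List Int) (h : j < t.length) :
    rowFromB s t i j next =
      (if i = s.length then ((max (s.length - i) (t.length - j) : Nat) : Int)
       else if s.getD i ' ' = t.getD j ' ' then next.getD (j+1) 0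
       else 1 + min (next.getD j 0) ((rowFromB s t i (j+1) next).getD 0 0))
        :: rowFromB s t i (j+1) next := by
  rw [rowFromB]; rw [dif_pos h]

lemma rowFromB_eq_out (s t : List Char) (i j : Nat) (next : List Int) (h : ¬ j < t.length) :
    rowFromB s t i j next = [((max (s.length - i) (t.length - j) : Nat) : Int)] := by
  rw [rowFromB]; rw [dif_neg h]

lemma tableB_eq_lt (s t : List Char) (i : Nat) (h : i < s.length) :
    tableB s t i = rowFromB s t i 0 ((tableB s t (i+1)).getD 0 []) :: tableB s t (i+1) := by
  rw [tableB]; rw [dif_pos h]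

lemma tableB_eq_ge (s t : List Char) (i : Nat) (h : ¬ i < s.length) :
    tableB s t i = [rowFromB s t i 0 []] := by
  rw [tableB]; rw [dif_neg h]

-- ---- the memo dict computed by A's dd is correct and closed ----

lemma ddA_spec (s t : List Char) : ∀ i j (d : PySem.Dict (Nat × Nat) Int),
    i ≤ s.length → j ≤ t.length → CorrectD s t d → ClosedD s t d →
    (ddA s t i j d).1 = Ed s t i j ∧ CorrectD s t (ddA s t i j d).2 ∧
    SubD d (ddA s t i j d).2 ∧ (((ddA s t i j d).2.get? (i, j)).isSome = true) ∧
    ClosedD s t (ddA s t i j d).2 ∧ DoneD s t (ddA s t i j d).2 i j := by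
  have main : ∀ N i j (d : PySem.Dict (Nat × Nat) Int),
      (s.length - i) + (t.length - j) ≤ N →
      i ≤ s.length → j ≤ t.length → CorrectD s t d → ClosedD s t d →
      (ddA s t i j d).1 = Ed s t i j ∧ CorrectD s t (ddA s t i j d).2 ∧
      SubD d (ddA s t i j d).2 ∧ (((ddA s t i j d).2.get? (i, j)).isSome = true) ∧
      ClosedD s t (ddA s t i j d).2 ∧ DoneD s t (ddA s t i j d).2 i j := by
    intro N
    induction N using Nat.strong_induction_on with
    | _ N ih =>
      intro i j d hN hi hj hC hCl
      by_cases hm : d.contains (i, j) = true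
      · -- memo hit
        rw [ddA_eq_memo s t i j d hm]
        rw [PySem.Dict.contains_eq_isSome_get?] at hm
        obtain ⟨v, hv⟩ := Option.isSome_iff_exists.mp hm
        have hvE : v = Ed s t i j := hC (i, j) v hv
        refine ⟨?_, hC, subD_refl d, hm, hCl, hCl (i, j) hm⟩
        show d.getD (i, j) 0 = Ed s t i j
        rw [PySem.Dict.getD_eq_get?_getD, hv, Option.getD_some, hvE]
      · by_cases hb : i = s.length ∨ j = t.length
        · -- boundary
          rw [ddA_eq_base s t i j d hm hb]
          have hnlt : ¬ (i < s.length ∧ j < t.length) := by omega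
          have hvE : ((max (t.length - j) (s.length - i) : Nat) : Int) = Ed s t i j := by
            rw [Ed_boundary s t i j hnlt, Nat.max_comm]
          have hsub := sub_insert s t d i j _ hC hvE
          have hdone : DoneD s t (d.insert (i, j) ((max (t.length - j) (s.length - i) : Nat) : Int)) i j := by
            rw [DoneD, dif_neg hnlt]; trivial
          refine ⟨hvE, correct_insert s t d i j _ hC hvE, hsub, ?_,
            closed_insert s t d i j _ hCl hsub hdone, hdone⟩
          rw [PySem.Dict.get?_insert_self]; rfl
        · have hlt : i < s.length ∧ j < t.length := by omega
          by_cases hc : s.getD i ' ' = t.getD j ' '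
          · -- matching characters
            rw [ddA_eq_match s t i j d hm hb hlt hc]
            obtain ⟨e, C, S, P, Cl, D⟩ :=
              ih ((s.length - (i+1)) + (t.length - (j+1))) (by omega) (i+1) (j+1) d
                (le_refl _) (by omega) (by omega) hC hCl
            have hvE : (ddA s t (i+1) (j+1) d).1 = Ed s t i j := by
              rw [e, ← Ed_match s t i j hlt hc]
            have hsub := sub_insert s t _ i j _ C hvE
            have hdone : DoneD s t ((ddA s t (i+1) (j+1) d).2.insert (i, j)
                (ddA s t (i+1) (j+1) d).1) i j := by
              rw [DoneD, dif_pos hlt, if_pos hc]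
              exact DoneD_mono s t _ _ hsub (i+1) (j+1) D
            refine ⟨hvE, correct_insert s t _ i j _ C hvE, subD_trans S hsub, ?_,
              closed_insert s t _ i j _ Cl hsub hdone, hdone⟩
            rw [PySem.Dict.get?_insert_self]; rfl
          · -- mismatching characters
            rw [ddA_eq_mis s t i j d hm hb hlt hc]
            obtain ⟨e1, C1, S1, P1, Cl1, D1⟩ :=
              ih ((s.length - (i+1)) + (t.length - j)) (by omega) (i+1) j d
                (le_refl _) (by omega) hj hC hCl
            obtain ⟨e2, C2, S2, P2, Cl2, D2⟩ :=
              ih ((s.length - i) + (t.length - (j+1))) (by omega) i (j+1)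
                (ddA s t (i+1) j d).2 (le_refl _) hi (by omega) C1 Cl1
            have hvE : 1 + min (ddA s t (i+1) j d).1
                (ddA s t i (j+1) (ddA s t (i+1) j d).2).1 = Ed s t i j := by
              rw [e1, e2, ← Ed_mis s t i j hlt hc]
            have hsub := sub_insert s t _ i j _ C2 hvE
            have hdone : DoneD s t
                ((ddA s t i (j+1) (ddA s t (i+1) j d).2).2.insert (i, j)
                  (1 + min (ddA s t (i+1) j d).1 (ddA s t i (j+1) (ddA s t (i+1) j d).2).1))
                i j := by
              rw [DoneD, dif_pos hlt, if_neg hc]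
              refine ⟨isSome_subD (subD_trans S2 hsub) _ P1, isSome_subD hsub _ P2,
                DoneD_mono s t _ _ (subD_trans S2 hsub) (i+1) j D1,
                DoneD_mono s t _ _ hsub i (j+1) D2⟩
            refine ⟨hvE, correct_insert s t _ i j _ C2 hvE,
              subD_trans S1 (subD_trans S2 hsub), ?_,
              closed_insert s t _ i j _ Cl2 hsub hdone, hdone⟩
            rw [PySem.Dict.get?_insert_self]; rfl
  exact fun i j d => main ((s.length - i) + (t.length - j)) i j d (le_refl _)

-- ---- B's table tabulates Ed ----

lemma rowFromB_getD (s t : List Char) (i : Nat) (next : List Int)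
    (hi : i ≤ s.length)
    (hnext : i < s.length → ∀ k, k ≤ t.length → next.getD k 0 = Ed s t (i+1) k) :
    ∀ j k, j + k ≤ t.length → (rowFromB s t i j next).getD k 0 = Ed s t i (j + k) := by
  have main : ∀ N j k, t.length - j ≤ N → j + k ≤ t.length →
      (rowFromB s t i j next).getD k 0 = Ed s t i (j + k) := by
    intro N
    induction N using Nat.strong_induction_on with
    | _ N ih =>
      intro j k hN hjk
      by_cases hj : j < t.length
      · rw [rowFromB_eq_in s t i j next hj]
        cases k with
        | zero =>
          rw [List.getD_cons_zero]
          by_cases hin : i = s.length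
          · rw [if_pos hin, Ed_boundary s t i (j + 0) (by omega)]
            congr 1
          · have hilt : i < s.length := by omega
            rw [if_neg hin]
            by_cases hc : s.getD i ' ' = t.getD j ' '
            · rw [if_pos hc, hnext hilt (j+1) (by omega)]
              have : j + 0 = j := by omega
              rw [this, Ed_match s t i j ⟨hilt, hj⟩ hc]
            · rw [if_neg hc, hnext hilt j (by omega)]
              have hrec : (rowFromB s t i (j+1) next).getD 0 0 = Ed s t i ((j+1) + 0) :=
                ih (t.length - (j+1)) (by omega) (j+1) 0 (le_refl _) (by omega)
              rw [hrec]
              have e1 : (j+1) + 0 = j + 1 := by omega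
              have e2 : j + 0 = j := by omega
              rw [e1, e2, Ed_mis s t i j ⟨hilt, hj⟩ hc]
        | succ k =>
          rw [List.getD_cons_succ]
          have hrec : (rowFromB s t i (j+1) next).getD k 0 = Ed s t i ((j+1) + k) :=
            ih (t.length - (j+1)) (by omega) (j+1) k (le_refl _) (by omega)
          rw [hrec]
          congr 1; omega
      · have hk : k = 0 := by omega
        have hjm : j = t.length := by omega
        rw [rowFromB_eq_out s t i j next hj, hk, List.getD_cons_zero,
          Ed_boundary s t i (j + 0) (by omega)]
        congr 2
  exact fun j k => main (t.length - j) j k (le_refl _)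

lemma tableB_getD (s t : List Char) : ∀ i0, i0 ≤ s.length → ∀ k j, i0 + k ≤ s.length →
    j ≤ t.length → dpB (tableB s t i0) k j = Ed s t (i0 + k) j := by
  have main : ∀ N i0, s.length - i0 ≤ N → i0 ≤ s.length → ∀ k j, i0 + k ≤ s.length →
      j ≤ t.length → dpB (tableB s t i0) k j = Ed s t (i0 + k) j := by
    intro N
    induction N using Nat.strong_induction_on with
    | _ N ih =>
      intro i0 hN hi0 k j hk hj
      by_cases hlt : i0 < s.length
      · rw [tableB_eq_lt s t i0 hlt]
        cases k with
        | zero =>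
          show (rowFromB s t i0 0 ((tableB s t (i0+1)).getD 0 [])).getD j 0 = _
          have hnext : i0 < s.length → ∀ kk, kk ≤ t.length →
              ((tableB s t (i0+1)).getD 0 []).getD kk 0 = Ed s t (i0+1) kk := by
            intro _ kk hkk
            have := ih (s.length - (i0+1)) (by omega) (i0+1) (le_refl _) (by omega)
              0 kk (by omega) hkk
            simpa [dpB] using this
          have := rowFromB_getD s t i0 _ (by omega) hnext 0 j (by omega)
          simpa using this
        | succ k =>
          show dpB (tableB s t (i0+1)) k j = _
          have := ih (s.length - (i0+1)) (by omega) (i0+1) (le_refl _) (by omega)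
            k j (by omega) hj
          rw [this]
          congr 1; omega
      · have hi0e : i0 = s.length := by omega
        have hk0 : k = 0 := by omega
        rw [tableB_eq_ge s t i0 hlt, hk0]
        show (rowFromB s t i0 0 []).getD j 0 = _
        have := rowFromB_getD s t i0 [] (by omega)
          (fun h _ _ => absurd h hlt) 0 j (by omega)
        simpa using this
  exact fun i0 hi0 k j => main (s.length - i0) i0 (le_refl _) hi0 k j

-- ---- the two reconstruction loops agree ----

lemma helper_eq (s t : List Char) (d : PySem.Dict (Nat × Nat) Int) (tab : List (List Int))
    (hC : CorrectD s t d)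
    (htab : ∀ i j, i ≤ s.length → j ≤ t.length → dpB tab i j = Ed s t i j) :
    ∀ i j, i ≤ s.length → j ≤ t.length → DoneD s t d i j →
    helperA s t d i j = helperB s t tab i j := by
  have main : ∀ N i j, (s.length - i) + (t.length - j) ≤ N →
      i ≤ s.length → j ≤ t.length → DoneD s t d i j →
      helperA s t d i j = helperB s t tab i j := by
    intro N
    induction N using Nat.strong_induction_on with
    | _ N ih =>
      intro i j hN hi hj hD
      by_cases hlt : i < s.length ∧ j < t.length
      · rw [DoneD, dif_pos hlt] at hD
        by_cases hc : s.getD i ' ' = t.getD j ' '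
        · rw [if_pos hc] at hD
          rw [helperA_eq_match s t d i j hlt hc, helperB_eq_match s t tab i j hlt hc]
          congr 1
          exact ih ((s.length - (i+1)) + (t.length - (j+1))) (by omega) (i+1) (j+1)
            (le_refl _) (by omega) (by omega) hD
        · rw [if_neg hc] at hD
          obtain ⟨P1, P2, D1, D2⟩ := hD
          obtain ⟨v1, hv1⟩ := Option.isSome_iff_exists.mp P1
          obtain ⟨v2, hv2⟩ := Option.isSome_iff_exists.mp P2
          have e1 : (d.get? (i+1, j)).getD 0 = Ed s t (i+1) j := by
            rw [hv1, Option.getD_some]; exact hC (i+1, j) v1 hv1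
          have e2 : (d.get? (i, j+1)).getD 0 = Ed s t i (j+1) := by
            rw [hv2, Option.getD_some]; exact hC (i, j+1) v2 hv2
          have t1 : dpB tab (i+1) j = Ed s t (i+1) j := htab (i+1) j (by omega) hj
          have t2 : dpB tab i (j+1) = Ed s t i (j+1) := htab i (j+1) hi (by omega)
          by_cases hle : Ed s t (i+1) j ≤ Ed s t i (j+1)
          · rw [helperA_eq_del s t d i j hlt hc (by rw [e1, e2]; exact hle),
              helperB_eq_del s t tab i j hlt hc (by rw [t1, t2]; exact hle)]
            congr 1
            exact ih ((s.length - (i+1)) + (t.length - j)) (by omega) (i+1) j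
              (le_refl _) (by omega) hj D1
          · rw [helperA_eq_ins s t d i j hlt hc (by rw [e1, e2]; exact hle),
              helperB_eq_ins s t tab i j hlt hc (by rw [t1, t2]; exact hle)]
            congr 1
            exact ih ((s.length - i) + (t.length - (j+1))) (by omega) i (j+1)
              (le_refl _) hi (by omega) D2
      · rw [helperA_eq_stop s t d i j hlt, helperB_eq_stop s t tab i j hlt]
  exact fun i j => main ((s.length - i) + (t.length - j)) i j (le_refl _)

-- ===== VERDICT (by name: the statement is the Claim_ definition above) =====
theorem diffBetweenTwoStrings_spec : Claim_equal_diffBetweenTwoStrings := by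
  unfold Claim_equal_diffBetweenTwoStrings
  intro source target _
  unfold Spec_diffBetweenTwoStrings diffBetweenTwoStrings diffBetweenTwoStrings_alt
  set s := source.toList
  set t := target.toList
  have hC0 : CorrectD s t PySem.Dict.empty := by
    intro p v h; simp [PySem.Dict.get?_empty] at h
  have hCl0 : ClosedD s t PySem.Dict.empty := by
    intro p h; simp [PySem.Dict.get?_empty] at h
  obtain ⟨_, hC, _, _, _, hDone⟩ :=
    ddA_spec s t 0 0 PySem.Dict.empty (Nat.zero_le _) (Nat.zero_le _) hC0 hCl0
  exact helper_eq s t _ _ hC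
    (fun i j hi hj => by simpa using tableB_getD s t 0 (Nat.zero_le _) i j (by omega) hj)
    0 0 (Nat.zero_le _) (Nat.zero_le _) hDone
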